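-- pv_equiv track=rewrite | github.com/zab88/python-tweet-clustering | main.py | get_vector
-- ===== SOURCE A (Python) =====
-- def get_vector(hashes, dict):
--     res_vector = []
--     for k, d in enumerate(dict):
--         res_vector.append(0)
--         for hash in hashes:
--             if hash == d:
--                 res_vector[k] += 1
--
--     return res_vector
-- ===== SOURCE B (Python) =====
-- def get_vector(hashes, dict):
--     # Inverted index: term -> all positions where it occurs in dict.
--     index = {}
--     for k, d in enumerate(dict):
--         index.setdefault(d, []).append(k)
--     res = [0] * len(dict)
--     # One pass over hashes, scattering increments into the positions.
--     for hash in hashes: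
--         for p in index.get(hash, []):
--             res[p] += 1
--     return res
-- ===== Notes on version B (the rewrite author's own statement) =====
-- stated objective: alternative
-- what changed: Replaces the nested scan of hashes once per dict term with an inverted index (term -> positions) built in one pass over dict, then a single pass over hashes scattering increments into the result positions.
import Mathlib
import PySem

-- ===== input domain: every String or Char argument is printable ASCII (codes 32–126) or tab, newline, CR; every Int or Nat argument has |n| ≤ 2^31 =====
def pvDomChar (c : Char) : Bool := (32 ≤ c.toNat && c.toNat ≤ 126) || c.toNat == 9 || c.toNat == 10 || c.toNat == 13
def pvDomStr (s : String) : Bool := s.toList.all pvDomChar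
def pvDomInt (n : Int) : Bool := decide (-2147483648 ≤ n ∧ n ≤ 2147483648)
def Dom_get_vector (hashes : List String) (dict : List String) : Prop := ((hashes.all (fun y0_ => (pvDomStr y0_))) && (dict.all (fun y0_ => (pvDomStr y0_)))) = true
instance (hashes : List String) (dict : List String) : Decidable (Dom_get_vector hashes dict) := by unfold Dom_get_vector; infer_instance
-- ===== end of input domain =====

-- B replaces A's nested scan (one pass over hashes per dict term) by an inverted index term->positions
-- built once over dict plus one scatter pass over hashes (objective: alternative algorithm).


-- ===== PORT A =====
-- for k, d in enumerate(dict): append 0; for hash in hashes: if hash == d: res_vector[k] += 1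
-- (the index k is always in range of res_vector, so the in-place update is List.set — exact here)
def get_vector (hashes : List String) (dict : List String) : List Int :=
  (PySem.List.enumerate dict).foldl (fun res kd =>
    (hashes.foldl (fun r h =>
      if h == kd.2 then r.set kd.1.toNat (r.getD kd.1.toNat 0 + 1) else r) (res ++ [(0 : Int)]))) []

-- ===== PORT B =====
-- index.setdefault(d, []).append(k)  ==  index[d] = index.get(d, []) + [k]
def pvIndex (dict : List String) : PySem.Dict String (List Int) :=
  (PySem.List.enumerate dict).foldl (fun ix kd => ix.insert kd.2 (ix.getD kd.2 [] ++ [kd.1])) PySem.Dict.empty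

-- res = [0]*len(dict); for hash in hashes: for p in index.get(hash, []): res[p] += 1
-- (every position p stored in the index is in range of res, so res[p] += 1 is List.set — exact here)
def get_vector_alt (hashes : List String) (dict : List String) : List Int :=
  hashes.foldl (fun res h =>
      ((pvIndex dict).getD h []).foldl (fun r p => r.set p.toNat (r.getD p.toNat 0 + 1)) res)
    (List.replicate dict.length (0 : Int))

-- ===== PRECONDITION & SPEC =====
def Spec_get_vector (hashes : List String) (dict : List String) (out : List Int) : Prop := out = get_vector_alt hashes dict
instance (hashes : List String) (dict : List String) (out : List Int) : Decidable (Spec_get_vector hashes dict out) := by unfold Spec_get_vector; infer_instance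

-- ===== CLAIM (what is proved, stated in full; the proofs are below) =====
def Claim_equal_get_vector : Prop := ∀ (hashes : List String) (dict : List String), Dom_get_vector hashes dict → Spec_get_vector hashes dict (get_vector hashes dict)

-- ===== LEMMAS AND PROOFS =====
-- Both ports equal dict.map (fun d => hashes.count d): A by a fold invariant over enumerate,
-- B by characterising the inverted index and the scatter fold pointwise.

theorem enum_eq (ds : List String) : ∀ (i : Int), PySem.List.enumerate ds i
    = (List.range ds.length).map (fun (t : Nat) => ((t : Int) + i, ds.getD t "")) := by
  induction ds with
  | nil => intro i; simp [PySem.List.enumerate]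
  | cons d ds ih =>
    intro i
    rw [show PySem.List.enumerate (d :: ds) i = (i, d) :: PySem.List.enumerate ds (i+1) by
      simp [PySem.List.enumerate]]
    rw [ih (i+1)]
    simp [List.range_succ_eq_map, List.map_map, Function.comp]
    intro a _; ring

theorem innerA (d : String) (res : List Int) : ∀ (hs : List String) (c : Int),
    hs.foldl (fun r h => if h == d then r.set res.length (r.getD res.length 0 + 1) else r) (res ++ [c])
      = res ++ [c + (hs.count d : Int)] := by
  intro hs
  induction hs with
  | nil => intro c; simp
  | cons h hs ih =>
    intro c
    by_cases hd : h == d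
    · simp only [List.foldl_cons, hd, if_pos]
      rw [show (res ++ [c]).getD res.length 0 = c by simp,
          show (res ++ [c]).set res.length (c + 1) = res ++ [c + 1] by simp]
      rw [ih (c+1)]
      have : (h :: hs).count d = hs.count d + 1 := by
        simp [List.count_cons, hd]
      rw [this]; push_cast; ring_nf
    · simp only [List.foldl_cons, hd, if_neg, Bool.false_eq_true, not_false_iff]
      rw [ih c]
      have : (h :: hs).count d = hs.count d := by
        simp [List.count_cons, hd]
      rw [this]

theorem outerA (hashes : List String) : ∀ (ds : List String) (res : List Int),
    (PySem.List.enumerate ds ((res.length : Nat) : Int)).foldl (fun res kd =>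
      (hashes.foldl (fun r h =>
        if h == kd.2 then r.set kd.1.toNat (r.getD kd.1.toNat 0 + 1) else r) (res ++ [(0 : Int)])))
      res
    = res ++ ds.map (fun d => ((hashes.count d : Nat) : Int)) := by
  intro ds
  induction ds with
  | nil => intro res; simp [PySem.List.enumerate]
  | cons d ds ih =>
    intro res
    rw [show PySem.List.enumerate (d :: ds) ((res.length : Nat) : Int)
        = (((res.length : Nat) : Int), d) :: PySem.List.enumerate ds (((res.length : Nat) : Int)+1) by
      simp [PySem.List.enumerate]]
    simp only [List.foldl_cons]
    rw [show (((res.length : Nat) : Int)).toNat = res.length by simp]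
    rw [innerA d res hashes 0, zero_add]
    have hlen : (((res.length : Nat) : Int)) + 1 = (((res ++ [((hashes.count d : Nat) : Int)]).length : Nat) : Int) := by
      simp
    rw [hlen, ih (res ++ [((hashes.count d : Nat) : Int)])]
    simp

theorem idx_getD (h : String) : ∀ (ps : List (Int × String)) (ix : PySem.Dict String (List Int)),
    (ps.foldl (fun ix kd => ix.insert kd.2 (ix.getD kd.2 [] ++ [kd.1])) ix).getD h []
      = ix.getD h [] ++ (ps.filter (fun kd => kd.2 == h)).map Prod.fst := by
  intro ps
  induction ps with
  | nil => intro ix; simp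
  | cons kd ps ih =>
    intro ix
    simp only [List.foldl_cons, ih, List.filter_cons]
    by_cases hk : kd.2 = h
    · simp [hk]
    · simp [hk, PySem.Dict.getD_insert, Ne.symm hk]

theorem P_char (dict : List String) (h : String) :
    (pvIndex dict).getD h []
      = ((List.range dict.length).filter (fun t => dict.getD t "" == h)).map (fun (t : Nat) => (t : Int)) := by
  rw [pvIndex, idx_getD, enum_eq]
  rw [show (PySem.Dict.empty : PySem.Dict String (List Int)).getD h [] = [] from rfl]
  simp only [List.filter_map, List.map_map]
  rfl

theorem P_mem (dict : List String) (h : String) (p : Int) (hp : p ∈ (pvIndex dict).getD h []) :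
    0 ≤ p ∧ p.toNat < dict.length := by
  rw [P_char] at hp
  simp only [List.mem_map, List.mem_filter, List.mem_range] at hp
  obtain ⟨t, ⟨ht, _⟩, rfl⟩ := hp
  omega

theorem P_count (dict : List String) (h : String) (k : Nat) (hk : k < dict.length) :
    ((pvIndex dict).getD h []).count ((k : Nat) : Int)
      = if dict.getD k "" == h then 1 else 0 := by
  rw [P_char]
  rw [List.count_map_of_injective _ _ (fun a b => by omega)]
  by_cases hd : dict.getD k "" == h
  · rw [if_pos hd]
    rw [List.count_filter]
    · exact List.count_eq_one_of_mem List.nodup_range (List.mem_range.mpr hk)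
    · exact hd
  · rw [if_neg hd]
    exact List.count_eq_zero.mpr (fun hm => hd ((List.mem_filter.mp hm).2))

theorem scatter_len : ∀ (ps : List Int) (res : List Int),
    (ps.foldl (fun r p => r.set p.toNat (r.getD p.toNat 0 + 1)) res).length = res.length := by
  intro ps
  induction ps with
  | nil => intro res; rfl
  | cons p ps ih => intro res; rw [List.foldl_cons, ih]; simp

theorem scatter_getD : ∀ (ps : List Int) (res : List Int) (k : Nat), k < res.length →
    (∀ p ∈ ps, 0 ≤ p ∧ p.toNat < res.length) →
    (ps.foldl (fun r p => r.set p.toNat (r.getD p.toNat 0 + 1)) res).getD k 0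
      = res.getD k 0 + ((ps.count ((k : Nat) : Int) : Nat) : Int) := by
  intro ps
  induction ps with
  | nil => intro res k _ _; simp
  | cons p ps ih =>
    intro res k hk hmem
    obtain ⟨hp0, hplen⟩ := hmem p (by simp)
    simp only [List.foldl_cons]
    rw [ih _ k (by simpa using hk) (by intro q hq; simpa using hmem q (by simp [hq]))]
    by_cases he : p.toNat = k
    · have hpk : p = ((k : Nat) : Int) := by omega
      rw [show (res.set p.toNat (res.getD p.toNat 0 + 1)).getD k 0 = res.getD k 0 + 1 by
        subst he; simp [List.getD_eq_getElem?_getD, hk]]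
      rw [List.count_cons, if_pos (by simp [hpk])]
      push_cast; ring
    · rw [show (res.set p.toNat (res.getD p.toNat 0 + 1)).getD k 0 = res.getD k 0 by
        simp [List.getD_eq_getElem?_getD, List.getElem?_set_ne he]]
      rw [List.count_cons, if_neg (by simp; omega)]
      simp

theorem Bfold_len (dict : List String) : ∀ (hs : List String) (res : List Int),
    (hs.foldl (fun res h =>
      ((pvIndex dict).getD h []).foldl (fun r p => r.set p.toNat (r.getD p.toNat 0 + 1)) res) res).length
      = res.length := by
  intro hs
  induction hs with
  | nil => intro res; rfl
  | cons h hs ih => intro res; rw [List.foldl_cons, ih, scatter_len]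

theorem Bfold_getD (dict : List String) : ∀ (hs : List String) (res : List Int),
    res.length = dict.length → ∀ k : Nat, k < dict.length →
    (hs.foldl (fun res h =>
      ((pvIndex dict).getD h []).foldl (fun r p => r.set p.toNat (r.getD p.toNat 0 + 1)) res) res).getD k 0
      = res.getD k 0 + ((hs.countP (fun h => dict.getD k "" == h) : Nat) : Int) := by
  intro hs
  induction hs with
  | nil => intro res _ k _; simp
  | cons h hs ih =>
    intro res hlen k hk
    rw [List.foldl_cons]
    rw [ih _ (by rw [scatter_len, hlen]) k hk]
    rw [scatter_getD _ res k (by omega) (fun p hp => by rw [hlen]; exact P_mem dict h p hp)]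
    rw [P_count dict h k hk]
    rw [List.countP_cons]
    by_cases hd : dict.getD k "" == h
    · rw [if_pos hd]; push_cast; ring
    · rw [if_neg hd]; push_cast; ring

theorem A_eq (hashes dict : List String) :
    get_vector hashes dict = dict.map (fun d => ((hashes.count d : Nat) : Int)) := by
  have := outerA hashes dict []
  simpa [get_vector] using this

theorem B_eq (hashes dict : List String) :
    get_vector_alt hashes dict = dict.map (fun d => ((hashes.count d : Nat) : Int)) := by
  apply List.ext_getElem
  · rw [get_vector_alt, Bfold_len]; simp
  · intro k hk hk2
    have hkd : k < dict.length := by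
      rw [get_vector_alt, Bfold_len] at hk; simpa using hk
    have hlen : (List.replicate dict.length (0:Int)).length = dict.length := by simp
    have hg := Bfold_getD dict hashes (List.replicate dict.length (0:Int)) hlen k hkd
    rw [show (get_vector_alt hashes dict)[k] = (get_vector_alt hashes dict).getD k 0 by
      rw [List.getD_eq_getElem _ _ hk]]
    rw [get_vector_alt, hg]
    rw [show (List.replicate dict.length (0:Int)).getD k 0 = 0 by simp]
    rw [List.getElem_map]
    rw [show List.countP (fun h => dict.getD k "" == h) hashes = hashes.count dict[k] by
      rw [List.count]
      apply List.countP_congr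
      intro h _
      simp only [beq_iff_eq, List.getD_eq_getElem _ _ hkd]
      exact eq_comm]
    simp

-- ===== VERDICT (by name: the statement is the Claim_ definition above) =====
theorem get_vector_spec : Claim_equal_get_vector := by
  intro hashes dict _
  show get_vector hashes dict = get_vector_alt hashes dict
  rw [A_eq, B_eq]
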